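-- pv_equiv track=rewrite | github.com/willemave/newsbuddy | scripts/verify_supervisor_programs.py | list_missing_running_programs
-- ===== SOURCE A (Python) =====
-- from collections.abc import Sequence
--
-- def parse_supervisor_status(status_output: str) -> list[tuple[str, str]]:
--     """Parse `supervisorctl status` output into `(name, status)` rows."""
--     rows: list[tuple[str, str]] = []
--
--     for raw_line in status_output.splitlines():
--         line = raw_line.strip()
--         if not line:
--             continue
--
--         parts = line.split()
--         if len(parts) < 2:
--             continue
--
--         rows.append((parts[0], parts[1]))
--
--     return rows
--
-- def _matches_configured_program(actual_name: str, configured_name: str) -> bool: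
--     """Return whether an actual supervisor entry matches a configured program name."""
--     return actual_name == configured_name or actual_name.startswith(f"{configured_name}:")
--
-- def list_missing_running_programs(
--     required_programs: Sequence[str],
--     status_output: str,
-- ) -> list[str]:
--     """Return required programs that are missing or not fully RUNNING."""
--     status_rows = parse_supervisor_status(status_output)
--     missing: list[str] = []
--
--     for required_name in required_programs:
--         matching_statuses = [
--             status
--             for actual_name, status in status_rows
--             if _matches_configured_program(actual_name, required_name)
--         ]
--         if not matching_statuses:
--             missing.append(required_name)
--             continue
--         if any(status != "RUNNING" for status in matching_statuses):
--             missing.append(required_name)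
--
--     return missing
-- ===== SOURCE B (Python) =====
-- from collections.abc import Sequence
--
--
-- def parse_supervisor_status(status_output: str) -> list[tuple[str, str]]:
--     """Parse `supervisorctl status` output into `(name, status)` rows."""
--     rows: list[tuple[str, str]] = []
--     for raw_line in status_output.splitlines():
--         line = raw_line.strip()
--         if not line:
--             continue
--         parts = line.split()
--         if len(parts) < 2:
--             continue
--         rows.append((parts[0], parts[1]))
--     return rows
--
--
-- def _candidate_names(actual_name: str) -> list[str]:
--     """The configured names an actual entry can match: itself and every colon-prefix."""
--     cands = [actual_name]
--     for i in range(len(actual_name)):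
--         if actual_name[i] == ":":
--             cands.append(actual_name[:i])
--     return cands
--
--
-- def list_missing_running_programs(
--     required_programs: Sequence[str],
--     status_output: str,
-- ) -> list[str]:
--     """Return required programs that are missing or not fully RUNNING."""
--     required = set(required_programs)
--     statuses: dict[str, list[str]] = {}
--     for actual_name, status in parse_supervisor_status(status_output):
--         for cand in _candidate_names(actual_name):
--             if cand in required:
--                 statuses.setdefault(cand, []).append(status)
--
--     missing: list[str] = []
--     for required_name in required_programs:
--         found = statuses.get(required_name, [])
--         if not found or any(s != "RUNNING" for s in found):
--             missing.append(required_name)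
--     return missing
-- ===== Notes on version B (the rewrite author's own statement) =====
-- stated objective: alternative
-- what changed: Instead of scanning all status rows once per required program, B makes a single pass over the rows, mapping each row's candidate configured names (the name and every colon-prefix) into a dict of statuses keyed by required name, then emits missing names by one lookup per required program.
import Mathlib
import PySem

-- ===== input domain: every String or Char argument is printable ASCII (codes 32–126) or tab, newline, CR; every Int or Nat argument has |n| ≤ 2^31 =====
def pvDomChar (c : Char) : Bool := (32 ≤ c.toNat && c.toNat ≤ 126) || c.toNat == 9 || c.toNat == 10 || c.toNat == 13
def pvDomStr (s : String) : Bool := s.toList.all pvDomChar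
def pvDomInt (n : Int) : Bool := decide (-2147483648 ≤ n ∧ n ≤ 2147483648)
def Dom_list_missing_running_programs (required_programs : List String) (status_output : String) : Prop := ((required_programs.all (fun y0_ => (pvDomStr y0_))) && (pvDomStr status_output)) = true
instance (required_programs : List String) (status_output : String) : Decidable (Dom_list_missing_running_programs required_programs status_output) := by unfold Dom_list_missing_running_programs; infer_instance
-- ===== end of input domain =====

-- B replaces A's per-required-program scan of all status rows by one pass over the rows,
-- grouping statuses into a dict keyed by each row's candidate configured names (objective: alternative).

-- ===== PORT A =====
def pyParseRows (status_output : String) : List (String × String) :=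
  (PySem.Str.splitlines status_output).foldl (fun rows raw_line =>
    let line := PySem.Str.strip raw_line
    if line = "" then rows
    else
      let parts := PySem.Str.split₀ line
      if parts.length < 2 then rows
      else rows ++ [(PySem.List.pyGetD parts 0 "", PySem.List.pyGetD parts 1 "")]) []

def matchesConfigured (actual_name configured_name : String) : Bool :=
  actual_name == configured_name || PySem.Str.startswith actual_name (configured_name ++ ":")

def list_missing_running_programs (required_programs : List String) (status_output : String) : List String :=
  let status_rows := pyParseRows status_output
  required_programs.foldl (fun missing required_name =>
    let matching_statuses :=
      (status_rows.filter (fun row => matchesConfigured row.1 required_name)).map (·.2)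
    if matching_statuses.isEmpty then missing ++ [required_name]
    else if matching_statuses.any (fun s => s != "RUNNING") then missing ++ [required_name]
    else missing) []

-- ===== PORT B =====
def candidateNames (actual_name : String) : List String :=
  (PySem.List.pyRange 0 (PySem.Str.len actual_name) 1).foldl (fun cands i =>
    if PySem.Str.pyGet? actual_name i == some ':' then
      cands ++ [PySem.Str.slice actual_name none (some i)]
    else cands) [actual_name]

def list_missing_running_programs_alt (required_programs : List String) (status_output : String) : List String :=
  let required : PySem.Set String := PySem.Set.ofList required_programs
  let statuses : PySem.Dict String (List String) :=
    (pyParseRows status_output).foldl (fun d row =>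
      (candidateNames row.1).foldl (fun d cand =>
        if PySem.Set.contains required cand then d.insert cand (d.getD cand [] ++ [row.2])
        else d) d) PySem.Dict.empty
  required_programs.foldl (fun missing required_name =>
    let found := statuses.getD required_name []
    if found.isEmpty || found.any (fun s => s != "RUNNING") then missing ++ [required_name]
    else missing) []

-- ===== PRECONDITION & SPEC =====
def Spec_list_missing_running_programs (required_programs : List String) (status_output : String) (out : List String) : Prop := out = list_missing_running_programs_alt required_programs status_output
instance (required_programs : List String) (status_output : String) (out : List String) : Decidable (Spec_list_missing_running_programs required_programs status_output out) := by unfold Spec_list_missing_running_programs; infer_instance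

-- ===== CLAIM (what is proved, stated in full; the proofs are below) =====
def Claim_equal_list_missing_running_programs : Prop := ∀ (required_programs : List String) (status_output : String), Dom_list_missing_running_programs required_programs status_output → Spec_list_missing_running_programs required_programs status_output (list_missing_running_programs required_programs status_output)

-- ===== LEMMAS AND PROOFS =====

-- (rl ++ ":") is a prefix of l iff some position k holds ':' with l.take k = rl
lemma prefix_colon_iff (l rl : List Char) :
    (rl ++ [':'] <+: l) ↔ ∃ k : Nat, k < l.length ∧ l.take k = rl ∧ l[k]? = some ':' := by
  constructor
  · rintro ⟨t, ht⟩
    have hl : l = rl ++ ':' :: t := by rw [← ht]; simp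
    subst hl
    refine ⟨rl.length, by simp, by simp, ?_⟩
    rw [List.getElem?_append_right (le_refl _)]
    simp
  · rintro ⟨k, hk, htake, hget⟩
    have h1 : l.take (k+1) = rl ++ [':'] := by
      rw [List.take_add_one, htake, hget]; rfl
    rw [← h1]; exact List.take_prefix _ _

lemma candidateNames_eq (a : String) :
    candidateNames a = a :: ((PySem.List.pyRange 0 (PySem.Str.len a) 1).filter
        (fun i => PySem.Str.pyGet? a i == some ':')).map
        (fun i => PySem.Str.slice a none (some i)) := by
  unfold candidateNames
  rw [PySem.List.foldl_append_if]
  simp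

-- membership in B's candidate list is exactly A's match predicate
lemma mem_candidateNames (a r : String) :
    r ∈ candidateNames a ↔ matchesConfigured a r = true := by
  rw [candidateNames_eq]
  simp only [List.mem_cons, List.mem_map, List.mem_filter, PySem.List.mem_pyRange_one,
    matchesConfigured, Bool.or_eq_true, beq_iff_eq, PySem.Str.startswith_eq,
    PySem.Chars.startswith_iff]
  have htl : (r ++ ":").toList = r.toList ++ [':'] := by simp
  rw [htl, prefix_colon_iff]
  constructor
  · rintro (h | ⟨i, ⟨⟨h0, hi⟩, hc⟩, hsl⟩)
    · exact Or.inl h.symm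
    · right
      refine ⟨i.toNat, ?_, ?_, ?_⟩
      · rw [PySem.Str.len_eq] at hi; omega
      · have := congrArg String.toList hsl
        rw [PySem.Str.toList_slice] at this
        rw [← this]
        show _ = PySem.List.slice _ _ _
        rw [PySem.List.slice_to _ h0]
      · have : PySem.Str.pyGet? a i = some ':' := by simpa using hc
        rw [show i = ((i.toNat : Nat) : Int) by omega, PySem.Str.pyGet?_natCast] at this
        exact this
  · rintro (h | ⟨k, hk, htake, hget⟩)
    · exact Or.inl h.symm
    · right
      refine ⟨(k : Int), ⟨⟨by omega, by rw [PySem.Str.len_eq]; omega⟩, ?_⟩, ?_⟩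
      · simp [hget]
      · apply String.toList_injective
        rw [PySem.Str.toList_slice]
        have : PySem.Chars.slice a.toList none (some (k:Int)) = a.toList.take k := by
          show PySem.List.slice _ _ _ = _
          rw [PySem.List.slice_to _ (by omega)]
          simp
        rw [this, htake]

lemma toList_candidate_len (a : String) (i : Int) (h0 : 0 ≤ i) :
    (PySem.Str.slice a none (some i)).toList = a.toList.take i.toNat := by
  rw [PySem.Str.toList_slice]
  show PySem.List.slice _ _ _ = _
  rw [PySem.List.slice_to _ h0]

lemma candidateNames_nodup (a : String) : (candidateNames a).Nodup := by
  rw [candidateNames_eq]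
  refine List.Nodup.cons ?_ ?_
  · intro hmem
    obtain ⟨i, hi, heq⟩ := List.mem_map.mp hmem
    obtain ⟨hiR, _⟩ := List.mem_filter.mp hi
    obtain ⟨h0, hlt⟩ := PySem.List.mem_pyRange_one.mp hiR
    rw [PySem.Str.len_eq] at hlt
    have := congrArg (fun s => s.toList.length) heq
    simp only [toList_candidate_len _ _ h0, List.length_take] at this
    omega
  · refine List.Nodup.map_on ?_ (List.Nodup.filter _ (PySem.List.nodup_pyRange_one _ _))
    intro i hi j hj heq
    obtain ⟨h0i, hlti⟩ := PySem.List.mem_pyRange_one.mp (List.mem_filter.mp hi).1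
    obtain ⟨h0j, hltj⟩ := PySem.List.mem_pyRange_one.mp (List.mem_filter.mp hj).1
    rw [PySem.Str.len_eq] at hlti hltj
    have := congrArg (fun s => s.toList.length) heq
    simp only [toList_candidate_len _ _ h0i, toList_candidate_len _ _ h0j, List.length_take] at this
    omega

-- the inner fold over a duplicate-free candidate list touches key r at most once
lemma inner_fold_getD (req : PySem.Set String) (st : String) :
    ∀ (cs : List String), cs.Nodup → ∀ (d : PySem.Dict String (List String)) (r : String),
    (cs.foldl (fun d cand =>
        if PySem.Set.contains req cand then d.insert cand (d.getD cand [] ++ [st]) else d) d).getD r []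
      = d.getD r [] ++ (if r ∈ cs ∧ PySem.Set.contains req r = true then [st] else []) := by
  intro cs
  induction cs with
  | nil => intro _ d r; simp
  | cons c cs ih =>
    intro hnd d r
    have hnd' := hnd.of_cons
    simp only [List.foldl_cons]
    rw [ih hnd']
    by_cases hcq : PySem.Set.contains req c = true
    · rw [if_pos hcq, PySem.Dict.getD_insert]
      by_cases hrc : r = c
      · subst hrc
        have hrn : r ∉ cs := (List.nodup_cons.mp hnd).1
        have hq : r ∈ req := by simpa using hcq
        simp [hrn, hq]
      · simp only [if_neg hrc]
        by_cases hrm : r ∈ cs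
        · simp [hrm, hrc]
        · simp [hrm, hrc]
    · rw [if_neg hcq]
      by_cases hrc : r = c
      · subst hrc
        have hq : r ∉ req := by simpa using hcq
        simp [hq]
      · by_cases hrm : r ∈ cs <;> simp [hrm, hrc]

-- the single pass collects, for each required key, exactly A's matching statuses in order
lemma outer_fold_getD (req : PySem.Set String) :
    ∀ (rows : List (String × String)) (d : PySem.Dict String (List String)) (r : String),
    PySem.Set.contains req r = true →
    (rows.foldl (fun d row =>
        (candidateNames row.1).foldl (fun d cand =>
          if PySem.Set.contains req cand then d.insert cand (d.getD cand [] ++ [row.2]) else d) d) d).getD r []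
      = d.getD r [] ++ (rows.filter (fun row => matchesConfigured row.1 r)).map (·.2) := by
  intro rows
  induction rows with
  | nil => intro d r _; simp
  | cons row rows ih =>
    intro d r hreq
    simp only [List.foldl_cons]
    rw [ih _ r hreq]
    rw [inner_fold_getD req row.2 _ (candidateNames_nodup row.1)]
    have hmem : (r ∈ candidateNames row.1) ↔ matchesConfigured row.1 r = true :=
      mem_candidateNames _ _
    by_cases hm : matchesConfigured row.1 r = true
    · rw [if_pos ⟨hmem.mpr hm, hreq⟩]
      simp [hm]
    · rw [if_neg (fun h => hm (hmem.mp h.1))]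
      simp [hm]

-- ===== VERDICT (by name: the statement is the Claim_ definition above) =====
theorem list_missing_running_programs_spec : Claim_equal_list_missing_running_programs := by
  intro required_programs status_output _
  unfold Spec_list_missing_running_programs list_missing_running_programs
    list_missing_running_programs_alt
  simp only
  apply PySem.List.foldl_congr_mem
  intro acc x hx
  have hreq : PySem.Set.contains (PySem.Set.ofList required_programs) x = true := by
    simp [PySem.Set.mem_ofList, hx]
  rw [outer_fold_getD _ (pyParseRows status_output) PySem.Dict.empty x hreq,
    PySem.Dict.getD_empty]
  simp only [List.nil_append]
  set m := ((pyParseRows status_output).filter (fun row => matchesConfigured row.1 x)).map (·.2)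
  by_cases he : m.isEmpty <;> by_cases ha : m.any (fun s => s != "RUNNING") <;> simp [he, ha]
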